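-- pv_equiv track=rewrite | github.com/chen-ky/GrammarCompiler | bf/main.py | parse
-- ===== SOURCE A (Python) =====
-- VALID_OPERATOR = [">", "<", "+", "-", "[", "]", ".", ","]
--
-- def parse(source_code, bracket_matcher):
--     cleaned_source_code = ""
--     l_bracket_stack = []
--     for char in source_code:
--         if char in VALID_OPERATOR:
--             if char == "[":
--                 l_bracket_stack.append(len(cleaned_source_code))
--             elif char == "]":
--                 if len(l_bracket_stack) <= 0:
--                     raise SyntaxError("Unmatched bracket.")
--                 l_bracket_pos = l_bracket_stack.pop()
--                 bracket_matcher[len(cleaned_source_code)] = l_bracket_pos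
--                 bracket_matcher[l_bracket_pos] = len(cleaned_source_code)
--             cleaned_source_code += char
--     return cleaned_source_code
-- ===== SOURCE B (Python) =====
-- VALID_OPERATOR = [">", "<", "+", "-", "[", "]", ".", ","]
--
-- def matching_open(cleaned, i):
--     depth = 0
--     for j in range(i - 1, -1, -1):
--         c = cleaned[j]
--         if c == "]":
--             depth += 1
--         elif c == "[":
--             if depth == 0:
--                 return j
--             depth -= 1
--     return -1
--
-- def parse(source_code, bracket_matcher):
--     cleaned = "".join(c for c in source_code if c in VALID_OPERATOR)
--     for i in range(len(cleaned)):
--         if cleaned[i] == "]":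
--             j = matching_open(cleaned, i)
--             if j < 0:
--                 raise SyntaxError("Unmatched bracket.")
--             bracket_matcher[i] = j
--             bracket_matcher[j] = i
--     return cleaned
-- ===== Notes on version B (the rewrite author's own statement) =====
-- stated objective: alternative
-- what changed: B drops A's left-bracket stack entirely: it first filters the source, then for each ']' finds its partner by a backward depth-counting scan over the cleaned text, trading A's single stack-based pass for stackless nested scans.
import Mathlib
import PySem

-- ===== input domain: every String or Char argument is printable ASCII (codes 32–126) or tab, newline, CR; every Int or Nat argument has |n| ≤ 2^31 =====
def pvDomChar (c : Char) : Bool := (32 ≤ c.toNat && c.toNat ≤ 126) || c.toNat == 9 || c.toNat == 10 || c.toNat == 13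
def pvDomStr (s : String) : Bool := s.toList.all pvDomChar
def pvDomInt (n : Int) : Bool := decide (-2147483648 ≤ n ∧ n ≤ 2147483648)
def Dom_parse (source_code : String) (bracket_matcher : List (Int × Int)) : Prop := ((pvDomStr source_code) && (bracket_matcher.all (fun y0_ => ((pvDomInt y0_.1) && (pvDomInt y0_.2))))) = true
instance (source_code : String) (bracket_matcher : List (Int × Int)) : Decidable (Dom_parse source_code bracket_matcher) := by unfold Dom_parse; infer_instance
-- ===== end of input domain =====

-- Header: B drops A's stack: it filters the source first, then matches each ']' by a backward
-- depth-counting scan over the cleaned text.  Both Pythons mutate bracket_matcher identically;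
-- the equivalence proved here is about the RETURN value.

-- ===== PORT A =====
def VALID_OPERATOR : List Char := ['>', '<', '+', '-', '[', ']', '.', ',']

-- A's single loop: state = (cleaned so far, '['-position stack, dict); none = SyntaxError.
def parseLoop : List Char → List Char → List Int → PySem.Dict Int Int → Option (List Char)
  | [], cleaned, _, _ => some cleaned
  | c :: rest, cleaned, stack, d =>
    if c ∈ VALID_OPERATOR then
      if c = '[' then
        parseLoop rest (cleaned ++ [c]) (stack ++ [(cleaned.length : Int)]) d
      else if c = ']' then
        match stack.getLast? with
        | none => none  -- raise SyntaxError("Unmatched bracket.")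
        | some p =>
          parseLoop rest (cleaned ++ [c]) stack.dropLast
            ((d.insert (cleaned.length : Int) p).insert p (cleaned.length : Int))
      else parseLoop rest (cleaned ++ [c]) stack d
    else parseLoop rest cleaned stack d

def parse (source_code : String) (bracket_matcher : List (Int × Int)) : String :=
  match parseLoop source_code.toList [] [] (PySem.Dict.ofList bracket_matcher) with
  | some cleaned => String.ofList cleaned
  | none => ""   -- unreachable under Pre_parse (Python raises SyntaxError here)

-- ===== PORT B =====
-- B's backward scan: j counts down from i-1 to 0 (here j is index+1, 0 = loop exhausted → -1).
def matchingOpen (cleaned : List Char) : Nat → Nat → Int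
  | 0, _ => -1
  | j + 1, depth =>
    let c := cleaned.getD j ' '
    if c = ']' then matchingOpen cleaned j (depth + 1)
    else if c = '[' then
      (if depth = 0 then (j : Int) else matchingOpen cleaned j (depth - 1))
    else matchingOpen cleaned j depth

def parse_alt (source_code : String) (bracket_matcher : List (Int × Int)) : String :=
  let cleaned := source_code.toList.filter (fun c => c ∈ VALID_OPERATOR)
  let res := (List.range cleaned.length).foldl
    (fun (acc : Option (PySem.Dict Int Int)) i =>
      match acc with
      | none => none   -- SyntaxError already raised
      | some d =>
        if cleaned.getD i ' ' = ']' then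
          let j := matchingOpen cleaned i 0
          if j < 0 then none  -- raise SyntaxError("Unmatched bracket.")
          else some ((d.insert (i : Int) j).insert j (i : Int))
        else some d)
    (some (PySem.Dict.ofList bracket_matcher))
  match res with
  | some _ => String.ofList cleaned
  | none => ""   -- unreachable under Pre_parse (Python raises SyntaxError here)

-- ===== PRECONDITION & SPEC =====
-- Pre_ excludes exactly the inputs on which A raises SyntaxError("Unmatched bracket."):
-- some prefix of the source contains more ']' than '[' characters.
def Pre_parse (source_code : String) (bracket_matcher : List (Int × Int)) : Prop :=
  ∀ n, n ≤ source_code.toList.length →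
    (source_code.toList.take n).count ']' ≤ (source_code.toList.take n).count '['
instance (source_code : String) (bracket_matcher : List (Int × Int)) : Decidable (Pre_parse source_code bracket_matcher) := by unfold Pre_parse; infer_instance

def pvWitness_parse : String × (List (Int × Int)) := ("+[>,.<-]x", [])

def Spec_parse (source_code : String) (bracket_matcher : List (Int × Int)) (out : String) : Prop := out = parse_alt source_code bracket_matcher
instance (source_code : String) (bracket_matcher : List (Int × Int)) (out : String) : Decidable (Spec_parse source_code bracket_matcher out) := by unfold Spec_parse; infer_instance

-- ===== CLAIM (what is proved, stated in full; the proofs are below) =====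
def Claim_equal_parse : Prop := ∀ (source_code : String) (bracket_matcher : List (Int × Int)), Dom_parse source_code bracket_matcher → Pre_parse source_code bracket_matcher → Spec_parse source_code bracket_matcher (parse source_code bracket_matcher)

-- ===== LEMMAS AND PROOFS =====

-- A's loop succeeds and produces exactly the filtered characters whenever every prefix of
-- the remaining input keeps the running ']'-count within stack depth plus the '['-count.
lemma parseLoop_eq_filter (l : List Char) :
    ∀ (cleaned : List Char) (stack : List Int) (d : PySem.Dict Int Int),
    (∀ n, n ≤ l.length → (l.take n).count ']' ≤ stack.length + (l.take n).count '[') →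
    parseLoop l cleaned stack d = some (cleaned ++ l.filter (fun c => c ∈ VALID_OPERATOR)) := by
  induction l with
  | nil => intro cleaned stack d _; simp [parseLoop]
  | cons c rest ih =>
    intro cleaned stack d h
    by_cases hop : c ∈ VALID_OPERATOR
    · by_cases hl : c = '['
      · subst hl
        rw [parseLoop]
        rw [if_pos hop, if_pos rfl,
          ih (cleaned ++ ['[']) (stack ++ [(cleaned.length : Int)]) d ?_]
        · simp [hop]
        · intro n hn
          have := h (n + 1) (by simpa using Nat.succ_le_succ hn)
          simp at this ⊢
          omega
      · by_cases hr : c = ']'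
        · subst hr
          have hst : stack ≠ [] := by
            have := h 1 (by simp)
            simp at this
            intro he; subst he; simp at this
          have hpos : 1 ≤ stack.length := by
            cases stack with
            | nil => exact absurd rfl hst
            | cons a s => simp
          rw [parseLoop]
          rw [if_pos hop, if_neg hl, if_pos rfl]
          cases hlast : stack.getLast? with
          | none => exact absurd (List.getLast?_eq_none_iff.mp hlast) hst
          | some p =>
            dsimp only
            rw [ih (cleaned ++ [']']) stack.dropLast
              ((d.insert (cleaned.length : Int) p).insert p (cleaned.length : Int)) ?_]
            · simp [hop]
            · intro n hn
              have := h (n + 1) (by simpa using Nat.succ_le_succ hn)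
              simp at this ⊢
              omega
        · rw [parseLoop]
          rw [if_pos hop, if_neg hl, if_neg hr, ih (cleaned ++ [c]) stack d ?_]
          · simp [hop]
          · intro n hn
            have := h (n + 1) (by simpa using Nat.succ_le_succ hn)
            simp [hl, hr] at this ⊢
            omega
    · rw [parseLoop]
      rw [if_neg hop, ih cleaned stack d ?_]
      · simp [hop]
      · intro n hn
        have := h (n + 1) (by simpa using Nat.succ_le_succ hn)
        have hcl : c ≠ '[' := fun he => hop (he ▸ by decide)
        have hcr : c ≠ ']' := fun he => hop (he ▸ by decide)
        simp [hcl, hcr] at this ⊢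
        omega

-- Any prefix of a filtered list is the filtering of some prefix of the original list.
lemma filter_take_exists (p : Char → Bool) (l : List Char) :
    ∀ m, ∃ n, n ≤ l.length ∧ (l.filter p).take m = (l.take n).filter p := by
  induction l with
  | nil => intro m; exact ⟨0, by simp⟩
  | cons c rest ih =>
    intro m
    cases m with
    | zero => exact ⟨0, by simp⟩
    | succ m' =>
      by_cases hc : p c
      · obtain ⟨n, hn, he⟩ := ih m'
        exact ⟨n + 1, by simpa using Nat.succ_le_succ hn, by simp [hc, he]⟩
      · obtain ⟨n, hn, he⟩ := ih (m' + 1)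
        exact ⟨n + 1, by simpa using Nat.succ_le_succ hn, by simp [hc, he]⟩

-- B's backward scan finds a '[' whenever the scanned region has enough surplus '['s.
lemma matchingOpen_nonneg (cleaned : List Char) :
    ∀ j depth, (cleaned.take j).count ']' + depth < (cleaned.take j).count '[' →
    0 ≤ matchingOpen cleaned j depth := by
  intro j
  induction j with
  | zero => intro depth h; simp at h
  | succ j' ih =>
    intro depth h
    by_cases hj : j' < cleaned.length
    · have ht : cleaned.take (j' + 1) = cleaned.take j' ++ [cleaned[j']] :=
        List.take_succ_eq_append_getElem hj
      have hg : cleaned.getD j' ' ' = cleaned[j'] := List.getD_eq_getElem _ _ hj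
      rw [ht, List.count_append, List.count_append] at h
      rw [matchingOpen, hg]
      by_cases hr : cleaned[j'] = ']'
      · rw [if_pos hr]
        rw [hr] at h; simp at h
        exact ih (depth + 1) (by omega)
      · by_cases hl : cleaned[j'] = '['
        · rw [if_neg hr, if_pos hl]
          by_cases hd : depth = 0
          · rw [if_pos hd]; exact Int.natCast_nonneg j'
          · rw [if_neg hd]
            rw [hl] at h; simp at h
            exact ih (depth - 1) (by omega)
        · rw [if_neg hr, if_neg hl]
          have h1 : List.count ']' [cleaned[j']] = 0 := by
            simp [hr]
          have h2 : List.count '[' [cleaned[j']] = 0 := by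
            simp [hl]
          rw [h1, h2] at h
          exact ih depth (by omega)
    · have hle : cleaned.length ≤ j' := Nat.le_of_not_lt hj
      have ht : cleaned.take (j' + 1) = cleaned.take j' := by
        rw [List.take_of_length_le hle, List.take_of_length_le (Nat.le_succ_of_le hle)]
      rw [ht] at h
      have hg : cleaned.getD j' ' ' = ' ' := List.getD_eq_default _ _ hle
      rw [matchingOpen, hg]
      simp only [if_neg (by decide : ¬ (' ' = ']')), if_neg (by decide : ¬ (' ' = '['))]
      exact ih depth h

-- If every index the fold visits keeps the state 'some', the fold stays 'some'.
lemma foldl_some (cleaned : List Char) :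
    ∀ (idxs : List Nat) (d : PySem.Dict Int Int),
    (∀ i ∈ idxs, cleaned.getD i ' ' = ']' → ¬ (matchingOpen cleaned i 0 < 0)) →
    ∃ d', idxs.foldl
      (fun (acc : Option (PySem.Dict Int Int)) i =>
        match acc with
        | none => none
        | some d =>
          if cleaned.getD i ' ' = ']' then
            let j := matchingOpen cleaned i 0
            if j < 0 then none
            else some ((d.insert (i : Int) j).insert j (i : Int))
          else some d)
      (some d) = some d' := by
  intro idxs
  induction idxs with
  | nil => intro d _; exact ⟨d, rfl⟩
  | cons i rest ih =>
    intro d h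
    simp only [List.foldl_cons]
    by_cases hc : cleaned.getD i ' ' = ']'
    · rw [if_pos hc, if_neg (h i (by simp) hc)]
      exact ih _ (fun k hk => h k (by simp [hk]))
    · rw [if_neg hc]
      exact ih _ (fun k hk => h k (by simp [hk]))

-- ===== VERDICT (by name: the statement is the Claim_ definition above) =====
theorem parse_spec : Claim_equal_parse := by
  intro source_code bracket_matcher _hdom hpre
  unfold Spec_parse parse parse_alt
  rw [parseLoop_eq_filter source_code.toList [] [] (PySem.Dict.ofList bracket_matcher)
      (by intro n hn; simpa using hpre n hn)]
  set cleaned := source_code.toList.filter (fun c => c ∈ VALID_OPERATOR) with hcl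
  -- the prefix condition transfers from the source to the cleaned text
  have hclean : ∀ m, (cleaned.take m).count ']' ≤ (cleaned.take m).count '[' := by
    intro m
    obtain ⟨n, hn, he⟩ := filter_take_exists (fun c => decide (c ∈ VALID_OPERATOR)) source_code.toList m
    have e1 := List.count_filter (p := fun c => decide (c ∈ VALID_OPERATOR))
      (a := ']') (l := source_code.toList.take n) (by decide)
    have e2 := List.count_filter (p := fun c => decide (c ∈ VALID_OPERATOR))
      (a := '[') (l := source_code.toList.take n) (by decide)
    rw [hcl, he, e1, e2]
    exact hpre n hn
  have hcond : ∀ i ∈ List.range cleaned.length,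
      cleaned.getD i ' ' = ']' → ¬ (matchingOpen cleaned i 0 < 0) := by
    intro i hi hbr
    have hil : i < cleaned.length := List.mem_range.mp hi
    have h1 : (cleaned.take (i + 1)) = cleaned.take i ++ [cleaned[i]] :=
      List.take_succ_eq_append_getElem hil
    have hg : cleaned[i] = ']' := by
      rw [← List.getD_eq_getElem cleaned ' ' hil]; exact hbr
    have h2 := hclean (i + 1)
    rw [h1, hg] at h2
    simp [List.count_append] at h2
    intro hneg
    have := matchingOpen_nonneg cleaned i 0 (by omega)
    omega
  obtain ⟨d', hd'⟩ := foldl_some cleaned (List.range cleaned.length)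
    (PySem.Dict.ofList bracket_matcher) hcond
  simp only [hd', List.nil_append]
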